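-- pv_equiv track=rewrite | github.com/TobiahRex/algorist | library_2025/CORE/applications/scheduling/interval_partitioning.py | interval_partitioning_depth
-- ===== SOURCE A (Python) =====
-- def interval_partitioning_depth(intervals):
--     """
--     Calculate minimum partitions using depth calculation (line sweep)
--
--     Alternative approach: Maximum depth = minimum partitions needed
--     Uses event-based line sweep (same as meeting rooms)
--
--     Time: O(n log n)
--     Space: O(n)
--     """
--     if not intervals:
--         return 0
--
--     # Separate starts and ends
--     starts = sorted(i[0] for i in intervals)
--     ends = sorted(i[1] for i in intervals)
--
--     depth = max_depth = 0
--     s = e = 0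
--
--     while s < len(starts):
--         if starts[s] < ends[e]:
--             depth += 1
--             max_depth = max(max_depth, depth)
--             s += 1
--         else:
--             depth -= 1
--             e += 1
--
--     return max_depth
-- ===== SOURCE B (Python) =====
-- def interval_partitioning_depth(intervals):
--     """Depth at a start point x = number of starts <= x minus number of ends <= x;
--     the minimum number of partitions is the maximum of this over all start points."""
--     if not intervals:
--         return 0
--     starts = [s for s, _ in intervals]
--     ends = [e for _, e in intervals]
--     return max(sum(1 for s in starts if s <= x) - sum(1 for e in ends if e <= x)
--                for x in starts)
-- ===== Notes on version B (the rewrite author's own statement) =====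
-- stated objective: simpler
-- what changed: A's event line sweep (two sorted arrays walked by a stateful two-pointer merge with a running depth counter) is replaced by a direct per-start formula: the depth at a start point x is (#starts <= x) - (#ends <= x), and the answer is the maximum of that over all start points, with no sorting and no pointer state.
import Mathlib
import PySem

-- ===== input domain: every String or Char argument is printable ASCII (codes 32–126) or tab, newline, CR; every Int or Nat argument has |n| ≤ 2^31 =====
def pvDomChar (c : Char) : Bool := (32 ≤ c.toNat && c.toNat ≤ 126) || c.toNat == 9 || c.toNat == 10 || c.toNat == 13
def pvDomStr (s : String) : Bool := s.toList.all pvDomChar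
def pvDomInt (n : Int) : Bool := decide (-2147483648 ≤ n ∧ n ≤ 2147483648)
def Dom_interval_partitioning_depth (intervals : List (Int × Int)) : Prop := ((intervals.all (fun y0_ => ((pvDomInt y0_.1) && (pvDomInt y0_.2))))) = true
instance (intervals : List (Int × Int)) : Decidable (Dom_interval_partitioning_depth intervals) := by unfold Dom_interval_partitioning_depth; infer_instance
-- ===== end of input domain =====

-- B replaces A's two-pointer merge sweep over the sorted start/end arrays by a direct
-- per-start formula (depth at start x = #starts ≤ x − #ends ≤ x, answer = max over starts);
-- objective: simpler (no sorting, no pointer state), not faster.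

-- ===== PORT A =====
-- A's while loop: each iteration advances s or e; Python's ends[e] may raise IndexError
-- (the `none` branch below, excluded by Pre_; the value returned there is immaterial).
def aloop (starts ends : List Int) (s e : Nat) (depth maxd : Int) : Int :=
  if h : s < starts.length then
    if he : e < ends.length then   -- Python's ends[e]: out of range = IndexError (else-branch below, excluded by Pre_)
      if starts[s] < ends[e] then
        aloop starts ends (s+1) e (depth+1) (max maxd (depth+1))
      else
        aloop starts ends s (e+1) (depth-1) maxd
    else maxd
  else maxd
termination_by (starts.length - s) + (ends.length + 1 - e)
decreasing_by
  · omega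
  · omega

def interval_partitioning_depth (intervals : List (Int × Int)) : Int :=
  if intervals = [] then 0
  else
    aloop (PySem.List.sorted (intervals.map Prod.fst) (fun x => x))
          (PySem.List.sorted (intervals.map Prod.snd) (fun x => x)) 0 0 0 0

-- ===== PORT B =====
-- `sum(1 for s in starts if s <= x)` is List.countP (sum of 0/1 over the list).
def interval_partitioning_depth_alt (intervals : List (Int × Int)) : Int :=
  if intervals = [] then 0
  else
    let starts := intervals.map Prod.fst
    let ends := intervals.map Prod.snd
    (PySem.List.max?
      (starts.map (fun x =>
        ((starts.countP (fun s => s ≤ x) : Int) - (ends.countP (fun e => e ≤ x) : Int))))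
      (fun y => y)).getD 0

-- ===== PRECONDITION & SPEC =====
-- Pre_ excludes exactly the inputs on which A raises IndexError (e runs off the end of
-- `ends`): nonempty lists whose maximal end is ≤ the maximal start.
def Pre_interval_partitioning_depth (intervals : List (Int × Int)) : Prop :=
  intervals = [] ∨ ∃ p ∈ intervals, ∀ q ∈ intervals, q.1 < p.2
instance (intervals : List (Int × Int)) : Decidable (Pre_interval_partitioning_depth intervals) := by
  unfold Pre_interval_partitioning_depth; infer_instance

def pvWitness_interval_partitioning_depth : (List (Int × Int)) := [(0, 2), (1, 3)]

def Spec_interval_partitioning_depth (intervals : List (Int × Int)) (out : Int) : Prop :=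
  out = interval_partitioning_depth_alt intervals
instance (intervals : List (Int × Int)) (out : Int) : Decidable (Spec_interval_partitioning_depth intervals out) := by
  unfold Spec_interval_partitioning_depth; infer_instance

-- ===== CLAIM (what is proved, stated in full; the proofs are below) =====
def Claim_equal_interval_partitioning_depth : Prop := ∀ (intervals : List (Int × Int)), Dom_interval_partitioning_depth intervals → Pre_interval_partitioning_depth intervals → Spec_interval_partitioning_depth intervals (interval_partitioning_depth intervals)


-- ===== LEMMAS AND PROOFS =====

-- index monotonicity of a (≤)-sorted list
theorem pvGetElem_mono (l : List Int) (hl : l.Pairwise (· ≤ ·)) (a b : Nat)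
    (hab : a ≤ b) (hb : b < l.length) : l[a]'(lt_of_le_of_lt hab hb) ≤ l[b] := by
  rcases Nat.lt_or_ge a b with h | h
  · exact (List.pairwise_iff_getElem.mp hl) a b (lt_of_le_of_lt hab hb) hb h
  · have : a = b := le_antisymm hab h
    subst this; exact le_refl _

-- master lemma: in a sorted list, index i is below countP (≤ x) iff l[i] ≤ x
theorem pvCountP_le_iff (l : List Int) (hl : l.Pairwise (· ≤ ·)) (x : Int)
    (i : Nat) (hi : i < l.length) :
    i < l.countP (fun v => v ≤ x) ↔ l[i] ≤ x := by
  constructor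
  · intro h
    by_contra hx
    push Not at hx
    have hsplit : l.countP (fun v => v ≤ x)
        = (l.take i).countP (fun v => v ≤ x) + (l.drop i).countP (fun v => v ≤ x) := by
      rw [← List.countP_append, List.take_append_drop]
    have hdrop : (l.drop i).countP (fun v => v ≤ x) = 0 := by
      rw [List.countP_eq_zero]
      intro a ha
      obtain ⟨j, hj, rfl⟩ := List.mem_iff_getElem.mp ha
      have hj' : i + j < l.length := by
        have := hj; simp [List.length_drop] at this; omega
      have : l[i] ≤ l[i + j] := pvGetElem_mono l hl i (i + j) (Nat.le_add_right _ _) hj'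
      have hgt : x < (l.drop i)[j] := by
        rw [List.getElem_drop]; omega
      simp; omega
    have htake : (l.take i).countP (fun v => v ≤ x) ≤ i := by
      calc (l.take i).countP (fun v => v ≤ x) ≤ (l.take i).length := List.countP_le_length
        _ ≤ i := by simp
    omega
  · intro h
    have htake : (l.take (i+1)).countP (fun v => v ≤ x) = i + 1 := by
      have hall : ∀ a ∈ l.take (i+1), (fun v => decide (v ≤ x)) a = true := by
        intro a ha
        obtain ⟨j, hj, rfl⟩ := List.mem_iff_getElem.mp ha
        have hj2 : j < i + 1 := by
          have := hj; simp [List.length_take] at this; omega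
        have hj3 : j < l.length := by
          have := hj; simp [List.length_take] at this; omega
        have h1 : (l.take (i+1))[j] = l[j]'hj3 := List.getElem_take
        have h2 : l[j]'hj3 ≤ l[i] := pvGetElem_mono l hl j i (by omega) hi
        simp [h1]; omega
      rw [List.countP_eq_length.mpr hall]
      simp; omega
    have hsplit : l.countP (fun v => v ≤ x)
        = (l.take (i+1)).countP (fun v => v ≤ x) + (l.drop (i+1)).countP (fun v => v ≤ x) := by
      rw [← List.countP_append, List.take_append_drop]
    omega

-- the last of the first (countP (≤ x)) elements of a sorted list containing x is x
theorem pvGetElem_countP_pred (l : List Int) (hl : l.Pairwise (· ≤ ·)) (x : Int)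
    (hx : x ∈ l) :
    1 ≤ l.countP (fun v => v ≤ x) ∧
    ∃ hc : l.countP (fun v => v ≤ x) - 1 < l.length,
      l[l.countP (fun v => v ≤ x) - 1] = x := by
  obtain ⟨i0, hi0, heq⟩ := List.mem_iff_getElem.mp hx
  have hi0c : i0 < l.countP (fun v => v ≤ x) :=
    (pvCountP_le_iff l hl x i0 hi0).mpr (le_of_eq heq)
  have hcl : l.countP (fun v => v ≤ x) ≤ l.length := List.countP_le_length
  have h1 : 1 ≤ l.countP (fun v => v ≤ x) := by omega
  have hc : l.countP (fun v => v ≤ x) - 1 < l.length := by omega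
  refine ⟨h1, hc, ?_⟩
  have hle : l[l.countP (fun v => v ≤ x) - 1] ≤ x :=
    (pvCountP_le_iff l hl x _ hc).mp (by omega)
  have hge : x ≤ l[l.countP (fun v => v ≤ x) - 1] := by
    calc x = l[i0] := heq.symm
      _ ≤ _ := pvGetElem_mono l hl i0 _ (by omega) hc
  omega

-- characterisation of A's merge sweep: it folds max over the per-start closed form
theorem pvAloop_eq (SS EE : List Int) (hS : SS.Pairwise (· ≤ ·)) (hE : EE.Pairwise (· ≤ ·))
    (hj : ∃ j, ∃ h : j < EE.length, ∀ i (hi : i < SS.length), SS[i] < EE[j])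
    (s e : Nat) (depth maxd : Int)
    (he : e ≤ EE.length)
    (hd : depth = (s : Int) - (e : Int))
    (hinv : ∀ jj (hjj : jj < e), ∀ i (hi : i < SS.length), s ≤ i →
      EE[jj]'(lt_of_lt_of_le hjj he) ≤ SS[i]) :
    aloop SS EE s e depth maxd =
      ((List.range' s (SS.length - s)).map
        (fun (k : Nat) => ((k : Int) + 1) - (EE.countP (fun v => v ≤ SS.getD k 0) : Int))).foldl max maxd := by
  rw [aloop]
  by_cases hs : s < SS.length
  · have heE : e < EE.length := by
      by_contra hee
      obtain ⟨j, hjl, hjall⟩ := hj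
      have h1 : EE[j] ≤ SS[s] := hinv j (by omega) s hs (le_refl _)
      have h2 : SS[s] < EE[j] := hjall s hs
      omega
    simp only [hs, heE, dite_true]
    by_cases hcmp : SS[s]'hs < EE[e]'heE
    · rw [if_pos hcmp]
      have hcnt : EE.countP (fun v => v ≤ SS[s]'hs) = e := by
        by_contra hne
        rcases Nat.lt_or_ge (EE.countP (fun v => v ≤ SS[s]'hs)) e with hlt | hge
        · have hc2 : EE.countP (fun v => v ≤ SS[s]'hs) < EE.length := by omega
          have := (pvCountP_le_iff EE hE (SS[s]'hs) _ hc2).mpr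
            (hinv _ hlt s hs (le_refl _))
          omega
        · have hlt2 : e < EE.countP (fun v => v ≤ SS[s]'hs) := by omega
          have := (pvCountP_le_iff EE hE (SS[s]'hs) e heE).mp hlt2
          omega
      have hrange : SS.length - s = (SS.length - (s+1)) + 1 := by omega
      rw [hrange, List.range'_succ, List.map_cons, List.foldl_cons]
      have hgs : ((s : Int) + 1) - (EE.countP (fun v => v ≤ SS.getD s 0) : Int) = depth + 1 := by
        have hgd : SS.getD s 0 = SS[s]'hs := List.getD_eq_getElem SS 0 hs
        rw [hgd, hcnt, hd]
        omega
      rw [hgs]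
      exact pvAloop_eq SS EE hS hE hj (s+1) e (depth+1) (max maxd (depth+1)) he
        (by omega)
        (fun jj hjj i hi hsi => hinv jj hjj i hi (by omega))
    · rw [if_neg hcmp]
      have hEe : EE[e]'heE ≤ SS[s]'hs := by omega
      exact pvAloop_eq SS EE hS hE hj s (e+1) (depth-1) maxd
        (by omega)
        (by omega)
        (fun jj hjj i hi hsi => by
          rcases Nat.lt_or_ge jj e with h | h
          · exact hinv jj h i hi hsi
          · have : jj = e := by omega
            subst this
            calc EE[jj]'(lt_of_lt_of_le hjj (by omega)) ≤ SS[s]'hs := hEe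
              _ ≤ SS[i] := pvGetElem_mono SS hS s i hsi hi)
  · have : SS.length - s = 0 := by omega
    simp [hs, this]
termination_by (SS.length - s) + (EE.length + 1 - e)
decreasing_by
  · omega
  · omega

theorem pvFoldl_max_const (t : List Int) (c : Int) (h : ∀ y ∈ t, y ≤ c) : t.foldl max c = c := by
  induction t with
  | nil => rfl
  | cons a t ih =>
    simp only [List.foldl_cons]
    have ha : a ≤ c := h a (List.mem_cons_self)
    rw [max_eq_left ha]
    exact ih (fun y hy => h y (List.mem_cons_of_mem _ hy))

theorem pvFoldl_max_eq (l : List Int) : ∀ (i m : Int), m ∈ l → (∀ y ∈ l, y ≤ m) → i ≤ m → l.foldl max i = m := by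
  induction l with
  | nil => intro i m hm _ _; simp at hm
  | cons a t ih =>
    intro i m hm hmax him
    simp only [List.foldl_cons]
    rcases List.mem_cons.mp hm with rfl | hmt
    · rw [max_eq_right him]
      exact pvFoldl_max_const t m (fun y hy => hmax y (List.mem_cons_of_mem _ hy))
    · exact ih (max i a) m hmt (fun y hy => hmax y (List.mem_cons_of_mem _ hy))
        (max_le him (hmax a (List.mem_cons_self)))

-- ===== VERDICT (by name: the statement is the Claim_ definition above) =====
theorem interval_partitioning_depth_spec : Claim_equal_interval_partitioning_depth := by
  unfold Claim_equal_interval_partitioning_depth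
  intro intervals _ hpre
  unfold Spec_interval_partitioning_depth
  by_cases hnil : intervals = []
  · subst hnil; rfl
  rcases hpre with h | ⟨p, hp, hlt⟩
  · exact absurd h hnil
  simp only [interval_partitioning_depth, interval_partitioning_depth_alt, hnil, if_false]
  -- abbreviations
  have hS0ne : intervals.map Prod.fst ≠ [] := by simp [hnil]
  have hpermS : (PySem.List.sorted (intervals.map Prod.fst) (fun x => x)).Perm (intervals.map Prod.fst) :=
    PySem.List.sorted_perm _ _ _
  have hpermE : (PySem.List.sorted (intervals.map Prod.snd) (fun x => x)).Perm (intervals.map Prod.snd) :=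
    PySem.List.sorted_perm _ _ _
  have hpairS : (PySem.List.sorted (intervals.map Prod.fst) (fun x => x)).Pairwise (· ≤ ·) :=
    PySem.List.sorted_pairwise _ _
  have hpairE : (PySem.List.sorted (intervals.map Prod.snd) (fun x => x)).Pairwise (· ≤ ·) :=
    PySem.List.sorted_pairwise _ _
  set SS := PySem.List.sorted (intervals.map Prod.fst) (fun x => x) with hSSdef
  set EE := PySem.List.sorted (intervals.map Prod.snd) (fun x => x) with hEEdef
  have hlenS : SS.length = intervals.length := by
    rw [hpermS.length_eq, List.length_map]
  have hlenE : EE.length = intervals.length := by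
    rw [hpermE.length_eq, List.length_map]
  have hn1 : 1 ≤ intervals.length := List.length_pos_iff.mpr hnil
  -- countP transfer between the sorted and the original lists
  have hcntS : ∀ x : Int, SS.countP (fun v => v ≤ x) = (intervals.map Prod.fst).countP (fun v => v ≤ x) :=
    fun x => hpermS.countP_eq _
  have hcntE : ∀ x : Int, EE.countP (fun v => v ≤ x) = (intervals.map Prod.snd).countP (fun v => v ≤ x) :=
    fun x => hpermE.countP_eq _
  -- the end p.2 dominates every start
  have hdom : ∀ x ∈ intervals.map Prod.fst, x < p.2 := by
    intro x hx
    obtain ⟨q, hq, rfl⟩ := List.mem_map.mp hx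
    exact hlt q hq
  have hj : ∃ j, ∃ h : j < EE.length, ∀ i (hi : i < SS.length), SS[i] < EE[j] := by
    have hpE : p.2 ∈ EE := hpermE.mem_iff.mpr (List.mem_map_of_mem hp)
    obtain ⟨j, hjl, hjeq⟩ := List.mem_iff_getElem.mp hpE
    refine ⟨j, hjl, fun i hi => ?_⟩
    rw [hjeq]
    exact hdom _ (hpermS.mem_iff.mp (SS.getElem_mem hi))
  -- A's side: the merge sweep equals the fold of the closed form
  rw [pvAloop_eq SS EE hpairS hpairE hj 0 0 0 0 (Nat.zero_le _) (by simp)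
    (fun jj hjj => by omega)]
  simp only [Nat.sub_zero]
  -- B's side: name the maximum
  cases hmx : PySem.List.max?
      ((intervals.map Prod.fst).map (fun x =>
        (((intervals.map Prod.fst).countP (fun s => s ≤ x) : Int)
          - ((intervals.map Prod.snd).countP (fun e => e ≤ x) : Int)))) (fun y => y) with
  | none =>
    rw [PySem.List.max?_eq_none_iff] at hmx
    simp [hnil] at hmx
  | some mH =>
    have hmem := PySem.List.max?_mem hmx
    have hmax : ∀ y ∈ (intervals.map Prod.fst).map (fun x =>
        (((intervals.map Prod.fst).countP (fun s => s ≤ x) : Int)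
          - ((intervals.map Prod.snd).countP (fun e => e ≤ x) : Int))), y ≤ mH :=
      PySem.List.max?_isMax hmx
    simp only [Option.getD_some]
    -- (c) 0 ≤ mH, via the maximal start
    have hlast : SS.length - 1 < SS.length := by omega
    have hmaxstart : ∀ a ∈ SS, a ≤ SS[SS.length - 1] := by
      intro a ha
      obtain ⟨i, hi, rfl⟩ := List.mem_iff_getElem.mp ha
      exact pvGetElem_mono SS hpairS i (SS.length - 1) (by omega) hlast
    have hcS_full : SS.countP (fun v => v ≤ SS[SS.length - 1]) = SS.length := by
      rw [List.countP_eq_length]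
      intro a ha
      simpa using hmaxstart a ha
    have hcE_small : EE.countP (fun v => v ≤ SS[SS.length - 1]) < EE.length := by
      have hle : EE.countP (fun v => v ≤ SS[SS.length - 1]) ≤ EE.length := List.countP_le_length
      rcases Nat.lt_or_ge (EE.countP (fun v => v ≤ SS[SS.length - 1])) EE.length with h | h
      · exact h
      · exfalso
        have heq : EE.countP (fun v => v ≤ SS[SS.length - 1]) = EE.length := by omega
        rw [List.countP_eq_length] at heq
        have hpE : p.2 ∈ EE := hpermE.mem_iff.mpr (List.mem_map_of_mem hp)
        have := heq p.2 hpE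
        have hxlt : SS[SS.length - 1] < p.2 :=
          hdom _ (hpermS.mem_iff.mp (SS.getElem_mem hlast))
        simp at this
        omega
    have hstar_mem : (((intervals.map Prod.fst).countP (fun s => s ≤ SS[SS.length - 1]) : Int)
        - ((intervals.map Prod.snd).countP (fun e => e ≤ SS[SS.length - 1]) : Int)) ∈
        (intervals.map Prod.fst).map (fun x =>
          (((intervals.map Prod.fst).countP (fun s => s ≤ x) : Int)
            - ((intervals.map Prod.snd).countP (fun e => e ≤ x) : Int))) :=
      List.mem_map_of_mem (hpermS.mem_iff.mp (SS.getElem_mem hlast))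
    have hmH0 : (0 : Int) ≤ mH := by
      have h1 := hmax _ hstar_mem
      rw [← hcntS, ← hcntE, hcS_full] at h1
      have h2 : (EE.countP (fun v => v ≤ SS[SS.length - 1]) : Int) ≤ (SS.length : Int) - 1 := by
        have := hcE_small
        omega
      omega
    -- the fold equals mH
    apply pvFoldl_max_eq _ 0 mH ?_ ?_ hmH0
    · -- mH occurs among the closed-form values
      obtain ⟨x, hxS0, hxeq⟩ := List.mem_map.mp hmem
      have hxSS : x ∈ SS := hpermS.mem_iff.mpr hxS0
      obtain ⟨h1c, hc, hceq⟩ := pvGetElem_countP_pred SS hpairS x hxSS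
      refine List.mem_map.mpr ⟨SS.countP (fun v => v ≤ x) - 1, ?_, ?_⟩
      · rw [List.mem_range'_1]
        constructor
        · omega
        · omega
      · have hgd : SS.getD (SS.countP (fun v => v ≤ x) - 1) 0 = x := by
          rw [List.getD_eq_getElem SS 0 hc, hceq]
        rw [hgd, ← hxeq, ← hcntS, ← hcntE]
        have : ((SS.countP (fun v => v ≤ x) - 1 : Nat) : Int)
            = (SS.countP (fun v => v ≤ x) : Int) - 1 := by omega
        rw [this]
        ring
    · -- every closed-form value is ≤ mH
      intro y hy
      obtain ⟨k, hkr, hkeq⟩ := List.mem_map.mp hy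
      rw [List.mem_range'_1] at hkr
      have hk : k < SS.length := by omega
      have hgd : SS.getD k 0 = SS[k] := List.getD_eq_getElem SS 0 hk
      have hkc : k < SS.countP (fun v => v ≤ SS[k]) :=
        (pvCountP_le_iff SS hpairS (SS[k]) k hk).mpr (le_refl _)
      have hmem2 : (((intervals.map Prod.fst).countP (fun s => s ≤ SS[k]) : Int)
          - ((intervals.map Prod.snd).countP (fun e => e ≤ SS[k]) : Int)) ∈
          (intervals.map Prod.fst).map (fun x =>
            (((intervals.map Prod.fst).countP (fun s => s ≤ x) : Int)
              - ((intervals.map Prod.snd).countP (fun e => e ≤ x) : Int))) :=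
        List.mem_map_of_mem (hpermS.mem_iff.mp (SS.getElem_mem hk))
      have h1 := hmax _ hmem2
      rw [← hcntS, ← hcntE] at h1
      rw [← hkeq, hgd]
      omega
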